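-- pv_equiv track=rewrite | github.com/efajiculay/SysBioSoft | BioSANS/build/lib/BioSANS2020/param_est.py | labelParam
-- ===== SOURCE A (Python) =====
-- def labelParam(Ks,ks):
-- 	pars = {}
-- 	count = 0
-- 	for i in range(len(Ks)):
-- 		if len(Ks[i]) == 1:
-- 			pars["kf"+str(i+1)] = ks[count]
-- 			count = count + 1
-- 		elif len(Ks[i]) == 2:
-- 			pars["kf"+str(i+1)] = ks[count]
-- 			count = count + 1
-- 			pars["kb"+str(i+1)] = ks[count]
-- 			count = count + 1
-- 	return pars
-- ===== SOURCE B (Python) =====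
-- def labelParam(Ks, ks):
--     return _label(1, Ks, ks)
--
--
-- def _label(i, Ks, ks):
--     if not Ks:
--         return {}
--     n = len(Ks[0])
--     if n == 1:
--         return {"kf" + str(i): ks[0], **_label(i + 1, Ks[1:], ks[1:])}
--     if n == 2:
--         return {"kf" + str(i): ks[0], "kb" + str(i): ks[1], **_label(i + 1, Ks[1:], ks[2:])}
--     return _label(i + 1, Ks[1:], ks)
-- ===== Notes on version B (the rewrite author's own statement) =====
-- stated objective: alternative
-- what changed: Replaces A's iterative index loop that threads a running ks-offset through in-place dict insertions with a structural recursion that destructures Ks and ks head-first, builds the suffix's dict first, and assembles the result back-to-front by dict-literal merge ({kf_i: ks[0], **rest}).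
import Mathlib
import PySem

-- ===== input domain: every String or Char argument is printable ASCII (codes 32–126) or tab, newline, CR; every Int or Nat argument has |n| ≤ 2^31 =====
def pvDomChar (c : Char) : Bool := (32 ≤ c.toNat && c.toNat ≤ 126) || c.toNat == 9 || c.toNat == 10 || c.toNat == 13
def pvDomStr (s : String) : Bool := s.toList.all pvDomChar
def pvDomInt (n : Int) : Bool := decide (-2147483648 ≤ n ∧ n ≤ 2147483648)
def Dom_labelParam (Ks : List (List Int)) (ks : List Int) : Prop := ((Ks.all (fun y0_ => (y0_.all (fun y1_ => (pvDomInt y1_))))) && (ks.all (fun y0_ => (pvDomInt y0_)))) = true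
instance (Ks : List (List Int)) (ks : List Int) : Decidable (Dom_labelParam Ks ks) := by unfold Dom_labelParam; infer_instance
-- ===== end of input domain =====

-- B replaces A's iterative offset-threaded insertion loop by a structural recursion that
-- destructures Ks and ks head-first and assembles the dict back-to-front by merge; no speed claim.

-- ===== PORT A =====
-- single pass over range(len(Ks)), threading (dict, count)
def labelParam (Ks : List (List Int)) (ks : List Int) : List (String × Int) :=
  ((PySem.List.pyRange 0 (PySem.List.len Ks) 1).foldl
    (fun (st : PySem.Dict String Int × Int) i =>
      if PySem.List.len (PySem.List.pyGetD Ks i []) = 1 then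
        (st.1.insert ("kf" ++ PySem.Int.toStr (i + 1)) (PySem.List.pyGetD ks st.2 0), st.2 + 1)
      else if PySem.List.len (PySem.List.pyGetD Ks i []) = 2 then
        ((st.1.insert ("kf" ++ PySem.Int.toStr (i + 1)) (PySem.List.pyGetD ks st.2 0)).insert
           ("kb" ++ PySem.Int.toStr (i + 1)) (PySem.List.pyGetD ks (st.2 + 1) 0), st.2 + 2)
      else st)
    (PySem.Dict.empty, 0)).1.items

-- ===== PORT B =====
-- _label(i, Ks, ks): structural recursion destructuring Ks and ks; the dict for the tail is
-- built first and merged behind the head's entries ({'kf'+str(i): ks[0], **rest})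
def labelParamGo (i : Int) : List (List Int) → List Int → PySem.Dict String Int
  | [], _ => PySem.Dict.empty
  | K :: t, ks =>
    if PySem.List.len K = 1 then
      (PySem.Dict.empty.insert ("kf" ++ PySem.Int.toStr i) (PySem.List.pyGetD ks 0 0)).update
        (labelParamGo (i + 1) t (PySem.List.slice ks (some 1) none)).items
    else if PySem.List.len K = 2 then
      ((PySem.Dict.empty.insert ("kf" ++ PySem.Int.toStr i) (PySem.List.pyGetD ks 0 0)).insert
          ("kb" ++ PySem.Int.toStr i) (PySem.List.pyGetD ks 1 0)).update
        (labelParamGo (i + 1) t (PySem.List.slice ks (some 2) none)).items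
    else labelParamGo (i + 1) t ks

def labelParam_alt (Ks : List (List Int)) (ks : List Int) : List (String × Int) :=
  (labelParamGo 1 Ks ks).items

-- ===== PRECONDITION & SPEC =====
-- Pre_ excludes exactly the inputs where ks is shorter than the number of emitted
-- keys, on which Python A (and B) raise IndexError.
def Pre_labelParam (Ks : List (List Int)) (ks : List Int) : Prop :=
  (Ks.map (fun K => if K.length = 1 then 1 else if K.length = 2 then 2 else 0)).sum ≤ ks.length

instance (Ks : List (List Int)) (ks : List Int) : Decidable (Pre_labelParam Ks ks) := by
  unfold Pre_labelParam; infer_instance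

def pvWitness_labelParam : List (List Int) × List Int := ([[1], [2, 3], [4, 5, 6]], [7, 8, 9])

def Spec_labelParam (Ks : List (List Int)) (ks : List Int) (out : List (String × Int)) : Prop := out = labelParam_alt Ks ks
instance (Ks : List (List Int)) (ks : List Int) (out : List (String × Int)) : Decidable (Spec_labelParam Ks ks out) := by unfold Spec_labelParam; infer_instance

-- ===== CLAIM (what is proved, stated in full; the proofs are below) =====
def Claim_equal_labelParam : Prop := ∀ (Ks : List (List Int)) (ks : List Int), Dom_labelParam Ks ks → Pre_labelParam Ks ks → Spec_labelParam Ks ks (labelParam Ks ks)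

-- ===== LEMMAS AND PROOFS =====

-- the ordered key table emitted for suffix t when the first reaction of t has 0-based index i
def pvKeys : List (List Int) → Int → List String
  | [], _ => []
  | K :: t, i =>
    if PySem.List.len K = 1 then ("kf" ++ PySem.Int.toStr (i + 1)) :: pvKeys t (i + 1)
    else if PySem.List.len K = 2 then
      ("kf" ++ PySem.Int.toStr (i + 1)) :: ("kb" ++ PySem.Int.toStr (i + 1)) :: pvKeys t (i + 1)
    else pvKeys t (i + 1)

-- pairing the key list with ks starting at offset c, threading (dict, offset)
def pvPair (ks : List Int) : PySem.Dict String Int → Int → List String → PySem.Dict String Int × Int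
  | d, c, [] => (d, c)
  | d, c, k :: t => pvPair ks (d.insert k (PySem.List.pyGetD ks c 0)) (c + 1) t

-- the association list pairing keys with ks[c], ks[c+1], …
def pvAssoc (ks : List Int) : List String → Int → List (String × Int)
  | [], _ => []
  | k :: l, c => (k, PySem.List.pyGetD ks c 0) :: pvAssoc ks l (c + 1)

theorem pvA_loop (ks : List Int) (t pre : List (List Int)) (d : PySem.Dict String Int) (c : Int) :
    (PySem.List.pyRange (pre.length : Int) (PySem.List.len (pre ++ t)) 1).foldl
      (fun (st : PySem.Dict String Int × Int) i =>
        if PySem.List.len (PySem.List.pyGetD (pre ++ t) i []) = 1 then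
          (st.1.insert ("kf" ++ PySem.Int.toStr (i + 1)) (PySem.List.pyGetD ks st.2 0), st.2 + 1)
        else if PySem.List.len (PySem.List.pyGetD (pre ++ t) i []) = 2 then
          ((st.1.insert ("kf" ++ PySem.Int.toStr (i + 1)) (PySem.List.pyGetD ks st.2 0)).insert
             ("kb" ++ PySem.Int.toStr (i + 1)) (PySem.List.pyGetD ks (st.2 + 1) 0), st.2 + 2)
        else st)
      (d, c)
    = pvPair ks d c (pvKeys t (pre.length : Int)) := by
  induction t generalizing pre d c with
  | nil =>
      rw [PySem.List.pyRange_one_eq_nil (by simp [PySem.List.len_eq])]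
      simp [pvKeys, pvPair]
  | cons K t ih =>
      have hab : (pre.length : Int) < PySem.List.len (pre ++ K :: t) := by
        simp only [PySem.List.len_eq, List.length_append, List.length_cons]
        push_cast; omega
      have hK : PySem.List.pyGetD (pre ++ K :: t) ((pre.length : Nat) : Int) [] = K := by
        rw [PySem.List.pyGetD_natCast]
        simp [List.getD_eq_getElem?_getD]
      rw [PySem.List.pyRange_one_cons hab, List.foldl_cons]
      have key : ∀ (d' : PySem.Dict String Int) (c' : Int),
          (PySem.List.pyRange ((pre.length : Int) + 1) (PySem.List.len (pre ++ K :: t)) 1).foldl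
            (fun (st : PySem.Dict String Int × Int) i =>
              if PySem.List.len (PySem.List.pyGetD (pre ++ K :: t) i []) = 1 then
                (st.1.insert ("kf" ++ PySem.Int.toStr (i + 1)) (PySem.List.pyGetD ks st.2 0), st.2 + 1)
              else if PySem.List.len (PySem.List.pyGetD (pre ++ K :: t) i []) = 2 then
                ((st.1.insert ("kf" ++ PySem.Int.toStr (i + 1)) (PySem.List.pyGetD ks st.2 0)).insert
                   ("kb" ++ PySem.Int.toStr (i + 1)) (PySem.List.pyGetD ks (st.2 + 1) 0), st.2 + 2)
              else st)
            (d', c')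
          = pvPair ks d' c' (pvKeys t ((pre.length : Int) + 1)) := by
        intro d' c'
        have ih' := ih (pre ++ [K]) d' c'
        simp only [List.append_assoc, List.singleton_append, List.length_append,
          List.length_cons, List.length_nil, Nat.cast_add, Nat.cast_one, zero_add] at ih'
        exact ih'
      by_cases h1 : PySem.List.len K = 1
      · simp only [hK, if_pos h1, pvKeys, pvPair, key]
      · by_cases h2 : PySem.List.len K = 2
        · simp only [hK, if_neg h1, if_pos h2, pvKeys, pvPair, key]
          have e : c + 1 + 1 = c + 2 := by ring
          rw [e]
        · simp only [hK, if_neg h1, if_neg h2, pvKeys, key]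

-- ---- decimal-representation injectivity (str(i) distinguishes distinct positive ints) ----

theorem pvDigitChar_inj : ∀ a : Nat, a < 10 → ∀ b : Nat, b < 10 →
    Nat.digitChar a = Nat.digitChar b → a = b := by decide

theorem pvToDigitsCore (f : Nat) : ∀ (n : Nat) (acc : List Char), 0 < n → n ≤ f →
    Nat.toDigitsCore 10 f n acc = ((Nat.digits 10 n).map Nat.digitChar).reverse ++ acc := by
  induction f with
  | zero => intro n acc h0 hf; omega
  | succ f ih =>
      intro n acc h0 hf
      rw [Nat.toDigitsCore]
      by_cases h : n / 10 = 0
      · have hn : n < 10 := by omega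
        rw [Nat.digits_def' (by norm_num) h0, h]
        simp
      · have hpos : 0 < n / 10 := Nat.pos_of_ne_zero h
        have hlt : n / 10 < n := Nat.div_lt_self h0 (by norm_num)
        rw [if_neg h, ih (n / 10) _ hpos (by omega), Nat.digits_def' (by norm_num) h0]
        simp

theorem pvMapDigit_inj : ∀ (l1 l2 : List Nat), (∀ x ∈ l1, x < 10) → (∀ x ∈ l2, x < 10) →
    l1.map Nat.digitChar = l2.map Nat.digitChar → l1 = l2 := by
  intro l1
  induction l1 with
  | nil => intro l2 _ _ h; cases l2 <;> simp_all
  | cons a l ih =>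
      intro l2 h1 h2 h
      cases l2 with
      | nil => simp_all
      | cons b l2 =>
          simp only [List.map_cons, List.cons.injEq] at h
          have ha := pvDigitChar_inj a (h1 a (by simp)) b (h2 b (by simp)) h.1
          have := ih l2 (fun x hx => h1 x (by simp [hx])) (fun x hx => h2 x (by simp [hx])) h.2
          simp [ha, this]

theorem pvToChars_pos (n : Nat) (h : 0 < n) :
    PySem.Int.toChars (n : Int) = ((Nat.digits 10 n).map Nat.digitChar).reverse := by
  have : ¬ ((n : Int) < 0) := by omega
  simp only [PySem.Int.toChars, if_neg this, Int.toNat_natCast, Nat.toDigits]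
  rw [pvToDigitsCore (n + 1) n [] h (by omega)]
  simp

theorem pvToChars_inj {i j : Int} (hi : 0 < i) (hj : 0 < j)
    (h : PySem.Int.toChars i = PySem.Int.toChars j) : i = j := by
  have hi' : i = ((i.toNat : Nat) : Int) := by omega
  have hj' : j = ((j.toNat : Nat) : Int) := by omega
  rw [hi', hj', pvToChars_pos i.toNat (by omega), pvToChars_pos j.toNat (by omega)] at h
  have h2 := List.reverse_injective h
  have h3 := pvMapDigit_inj _ _
    (fun x hx => Nat.digits_lt_base (by norm_num) hx)
    (fun x hx => Nat.digits_lt_base (by norm_num) hx) h2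
  have h4 := congrArg (Nat.ofDigits 10) h3
  rw [Nat.ofDigits_digits, Nat.ofDigits_digits] at h4
  omega

theorem pvKeyF_inj {i j : Int} (hi : 0 < i) (hj : 0 < j)
    (h : "kf" ++ PySem.Int.toStr i = "kf" ++ PySem.Int.toStr j) : i = j := by
  apply pvToChars_inj hi hj
  have h2 := congrArg String.toList h
  simp only [String.toList_append, PySem.Int.toList_toStr] at h2
  exact List.append_cancel_left h2

theorem pvKeyB_inj {i j : Int} (hi : 0 < i) (hj : 0 < j)
    (h : "kb" ++ PySem.Int.toStr i = "kb" ++ PySem.Int.toStr j) : i = j := by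
  apply pvToChars_inj hi hj
  have h2 := congrArg String.toList h
  simp only [String.toList_append, PySem.Int.toList_toStr] at h2
  exact List.append_cancel_left h2

theorem pvKF_ne_KB (i j : Int) : "kf" ++ PySem.Int.toStr i ≠ "kb" ++ PySem.Int.toStr j := by
  intro h
  have h2 := congrArg String.toList h
  simp only [String.toList_append, PySem.Int.toList_toStr] at h2
  have hkf : "kf".toList = ['k', 'f'] := rfl
  have hkb : "kb".toList = ['k', 'b'] := rfl
  rw [hkf, hkb] at h2
  simp at h2

-- every key emitted for suffix t after index x carries an index strictly above x
theorem pvKeys_mem (t : List (List Int)) : ∀ (x : Int) (k : String), k ∈ pvKeys t x →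
    ∃ j : Int, x < j ∧ (k = "kf" ++ PySem.Int.toStr j ∨ k = "kb" ++ PySem.Int.toStr j) := by
  induction t with
  | nil => intro x k hk; simp [pvKeys] at hk
  | cons K t ih =>
      intro x k hk
      by_cases h1 : PySem.List.len K = 1
      · simp only [pvKeys, if_pos h1, List.mem_cons] at hk
        rcases hk with hk | hk
        · exact ⟨x + 1, by omega, Or.inl hk⟩
        · obtain ⟨j, hj, hj2⟩ := ih (x + 1) k hk; exact ⟨j, by omega, hj2⟩
      · by_cases h2 : PySem.List.len K = 2
        · simp only [pvKeys, if_neg h1, if_pos h2, List.mem_cons] at hk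
          rcases hk with hk | hk | hk
          · exact ⟨x + 1, by omega, Or.inl hk⟩
          · exact ⟨x + 1, by omega, Or.inr hk⟩
          · obtain ⟨j, hj, hj2⟩ := ih (x + 1) k hk; exact ⟨j, by omega, hj2⟩
        · simp only [pvKeys, if_neg h1, if_neg h2] at hk
          obtain ⟨j, hj, hj2⟩ := ih (x + 1) k hk; exact ⟨j, by omega, hj2⟩

theorem pvKF_not_mem (t : List (List Int)) (x i : Int) (hi : 0 < i) (hix : i ≤ x) :
    ("kf" ++ PySem.Int.toStr i) ∉ pvKeys t x := by
  intro hmem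
  obtain ⟨j, hj, heq | hsne⟩ := pvKeys_mem t x _ hmem
  · have := pvKeyF_inj hi (by omega) heq; omega
  · exact pvKF_ne_KB i j hsne

theorem pvKB_not_mem (t : List (List Int)) (x i : Int) (hi : 0 < i) (hix : i ≤ x) :
    ("kb" ++ PySem.Int.toStr i) ∉ pvKeys t x := by
  intro hmem
  obtain ⟨j, hj, heq | hsne⟩ := pvKeys_mem t x _ hmem
  · exact pvKF_ne_KB j i heq.symm
  · have := pvKeyB_inj hi (by omega) hsne; omega

theorem pvKeys_nodup (t : List (List Int)) : ∀ x : Int, 0 ≤ x → (pvKeys t x).Nodup := by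
  induction t with
  | nil => intro x _; simp [pvKeys]
  | cons K t ih =>
      intro x hx
      by_cases h1 : PySem.List.len K = 1
      · simp only [pvKeys, if_pos h1, List.nodup_cons]
        exact ⟨pvKF_not_mem t (x + 1) (x + 1) (by omega) le_rfl, ih (x + 1) (by omega)⟩
      · by_cases h2 : PySem.List.len K = 2
        · simp only [pvKeys, if_neg h1, if_pos h2, List.nodup_cons, List.mem_cons]
          refine ⟨?_, pvKB_not_mem t (x + 1) (x + 1) (by omega) le_rfl,
            ih (x + 1) (by omega)⟩
          rintro (h | h)
          · exact pvKF_ne_KB (x + 1) (x + 1) h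
          · exact pvKF_not_mem t (x + 1) (x + 1) (by omega) le_rfl h
        · simp only [pvKeys, if_neg h1, if_neg h2]
          exact ih (x + 1) (by omega)

-- ---- A's sequential pairing yields the association list ----

theorem pvPair_items (ks : List Int) : ∀ (l : List String) (d : PySem.Dict String Int) (c : Int),
    l.Nodup → (∀ k ∈ l, d.contains k = false) →
    (pvPair ks d c l).1.items = d.items ++ pvAssoc ks l c := by
  intro l
  induction l with
  | nil => intro d c _ _; simp [pvPair, pvAssoc]
  | cons k l ih =>
      intro d c hnd hfr
      simp only [pvPair, pvAssoc]
      rw [ih (d.insert k (PySem.List.pyGetD ks c 0)) (c + 1) (List.Nodup.of_cons hnd) ?_]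
      · rw [PySem.Dict.items_insert_of_not_contains d _ (hfr k (by simp))]
        simp
      · intro k' hk'
        rw [PySem.Dict.contains_insert]
        have hne : k' ≠ k := fun h => (List.nodup_cons.mp hnd).1 (h ▸ hk')
        simp [hne, hfr k' (by simp [hk'])]

-- ---- shifting the value offset instead of dropping from ks ----

theorem pvAssoc_drop (ks : List Int) (m : Nat) : ∀ (l : List String) (c : Int), 0 ≤ c →
    pvAssoc (ks.drop m) l c = pvAssoc ks l (c + m) := by
  intro l
  induction l with
  | nil => intro c _; simp [pvAssoc]
  | cons k l ih =>
      intro c hc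
      simp only [pvAssoc]
      rw [ih (c + 1) (by omega)]
      have hv : PySem.List.pyGetD (ks.drop m) c 0 = PySem.List.pyGetD ks (c + m) 0 := by
        rw [PySem.List.pyGetD_of_nonneg _ _ hc, PySem.List.pyGetD_of_nonneg _ _ (by omega)]
        simp only [List.getD_eq_getElem?_getD, List.getElem?_drop]
        have : m + c.toNat = (c + m).toNat := by omega
        rw [this]
      rw [hv]
      have : c + 1 + (m : Int) = c + m + 1 := by ring
      rw [this]

-- ---- B's back-to-front merge yields the same association list ----

theorem pvAssoc_map_fst (ks : List Int) : ∀ (l : List String) (c : Int),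
    (pvAssoc ks l c).map Prod.fst = l := by
  intro l
  induction l with
  | nil => intro c; simp [pvAssoc]
  | cons k l ih => intro c; simp [pvAssoc, ih]

theorem pvGo_items (t : List (List Int)) : ∀ (x : Int) (ks : List Int), 0 ≤ x →
    (labelParamGo (x + 1) t ks).items = pvAssoc ks (pvKeys t x) 0 := by
  induction t with
  | nil => intro x ks _; simp [labelParamGo, pvKeys, pvAssoc, PySem.Dict.empty]
  | cons K t ih =>
      intro x ks hx
      by_cases h1 : PySem.List.len K = 1
      · simp only [labelParamGo, if_pos h1, PySem.List.slice_from_one]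
        have hIH := ih (x + 1) ks.tail (by omega)
        rw [show x + 1 + 1 = (x + 1) + 1 from rfl] at hIH
        set d1 := PySem.Dict.empty.insert ("kf" ++ PySem.Int.toStr (x + 1)) (PySem.List.pyGetD ks 0 0) with hd1
        have hd1items : d1.items = [("kf" ++ PySem.Int.toStr (x + 1), PySem.List.pyGetD ks 0 0)] := by
          rw [hd1, PySem.Dict.items_insert_of_not_contains _ _ (PySem.Dict.contains_empty _)]
          simp [PySem.Dict.empty]
        have hfr : ∀ p ∈ pvAssoc ks.tail (pvKeys t (x + 1)) 0, d1.contains p.1 = false := by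
          intro p hp
          have hk : p.1 ∈ pvKeys t (x + 1) := by
            have := List.mem_map_of_mem (f := Prod.fst) hp
            rwa [pvAssoc_map_fst] at this
          rw [hd1, PySem.Dict.contains_insert, PySem.Dict.contains_empty]
          have hne : p.1 ≠ "kf" ++ PySem.Int.toStr (x + 1) := by
            intro h; exact pvKF_not_mem t (x + 1) (x + 1) (by omega) le_rfl (h ▸ hk)
          simp [hne]
        have hnd : ((pvAssoc ks.tail (pvKeys t (x + 1)) 0).map (fun p => p.1)).Nodup := by
          have := pvKeys_nodup t (x + 1) (by omega)
          simpa [pvAssoc_map_fst] using this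
        rw [hIH]
        have hupd := PySem.Dict.items_foldl_insert_fresh
          (pvAssoc ks.tail (pvKeys t (x + 1)) 0) (fun p => p.1) (fun p => p.2) d1 hfr hnd
        rw [show d1.update (pvAssoc ks.tail (pvKeys t (x + 1)) 0)
              = (pvAssoc ks.tail (pvKeys t (x + 1)) 0).foldl (fun d a => d.insert a.1 a.2) d1 from rfl]
        rw [hupd, hd1items]
        have hshift : pvAssoc ks.tail (pvKeys t (x + 1)) 0 = pvAssoc ks (pvKeys t (x + 1)) 1 := by
          rw [← List.drop_one, pvAssoc_drop ks 1 _ 0 le_rfl]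
          norm_num
        simp only [pvKeys, if_pos h1, pvAssoc]
        simp [← hshift]
      · by_cases h2 : PySem.List.len K = 2
        · simp only [labelParamGo, if_neg h1, if_pos h2]
          rw [PySem.List.slice_from ks (by norm_num : (0:Int) ≤ 2)]
          have hIH := ih (x + 1) (ks.drop (2:Int).toNat) (by omega)
          set kf := "kf" ++ PySem.Int.toStr (x + 1) with hkf
          set kb := "kb" ++ PySem.Int.toStr (x + 1) with hkb
          have hne : kb ≠ kf := fun h => pvKF_ne_KB (x + 1) (x + 1) h.symm
          set d1 := PySem.Dict.empty.insert kf (PySem.List.pyGetD ks 0 0) with hd1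
          set d2 := d1.insert kb (PySem.List.pyGetD ks 1 0) with hd2
          have hd1items : d1.items = [(kf, PySem.List.pyGetD ks 0 0)] := by
            rw [hd1, PySem.Dict.items_insert_of_not_contains _ _ (PySem.Dict.contains_empty _)]
            simp [PySem.Dict.empty]
          have hd1c : d1.contains kb = false := by
            rw [hd1, PySem.Dict.contains_insert, PySem.Dict.contains_empty]
            simp [hne]
          have hd2items : d2.items = [(kf, PySem.List.pyGetD ks 0 0), (kb, PySem.List.pyGetD ks 1 0)] := by
            rw [hd2, PySem.Dict.items_insert_of_not_contains _ _ hd1c, hd1items]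
            rfl
          have hfr : ∀ p ∈ pvAssoc (ks.drop (2:Int).toNat) (pvKeys t (x + 1)) 0, d2.contains p.1 = false := by
            intro p hp
            have hk : p.1 ∈ pvKeys t (x + 1) := by
              have := List.mem_map_of_mem (f := Prod.fst) hp
              rwa [pvAssoc_map_fst] at this
            rw [hd2, PySem.Dict.contains_insert, hd1, PySem.Dict.contains_insert,
              PySem.Dict.contains_empty]
            have hnef : p.1 ≠ kf := by
              intro h
              have hk' : kf ∈ pvKeys t (x + 1) := h ▸ hk
              rw [hkf] at hk'
              exact pvKF_not_mem t (x + 1) (x + 1) (by omega) le_rfl hk'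
            have hneb : p.1 ≠ kb := by
              intro h
              have hk' : kb ∈ pvKeys t (x + 1) := h ▸ hk
              rw [hkb] at hk'
              exact pvKB_not_mem t (x + 1) (x + 1) (by omega) le_rfl hk'
            simp [hnef, hneb]
          have hnd : ((pvAssoc (ks.drop (2:Int).toNat) (pvKeys t (x + 1)) 0).map (fun p => p.1)).Nodup := by
            have := pvKeys_nodup t (x + 1) (by omega)
            simpa [pvAssoc_map_fst] using this
          rw [hIH]
          have hupd := PySem.Dict.items_foldl_insert_fresh
            (pvAssoc (ks.drop (2:Int).toNat) (pvKeys t (x + 1)) 0) (fun p => p.1) (fun p => p.2) d2 hfr hnd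
          rw [show d2.update (pvAssoc (ks.drop (2:Int).toNat) (pvKeys t (x + 1)) 0)
                = (pvAssoc (ks.drop (2:Int).toNat) (pvKeys t (x + 1)) 0).foldl (fun d a => d.insert a.1 a.2) d2 from rfl]
          rw [hupd, hd2items]
          have hshift : pvAssoc (ks.drop (2:Int).toNat) (pvKeys t (x + 1)) 0 = pvAssoc ks (pvKeys t (x + 1)) 2 := by
            rw [pvAssoc_drop ks (2:Int).toNat _ 0 le_rfl]
            norm_num
          simp only [pvKeys, if_neg h1, if_pos h2, pvAssoc]
          simp [← hshift]
          exact ⟨hkf, hkb⟩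
        · simp only [labelParamGo, if_neg h1, if_neg h2, pvKeys]
          exact ih (x + 1) ks (by omega)

-- ===== VERDICT (by name: the statement is the Claim_ definition above) =====
theorem labelParam_spec : Claim_equal_labelParam := by
  intro Ks ks _ _
  unfold Spec_labelParam labelParam labelParam_alt
  have hA := pvA_loop ks Ks [] PySem.Dict.empty 0
  simp only [List.nil_append, List.length_nil, Nat.cast_zero] at hA
  refine (congrArg (fun p : PySem.Dict String Int × Int => p.1.items) hA).trans ?_
  rw [pvPair_items ks _ _ _ (pvKeys_nodup Ks 0 le_rfl)
    (by intro k _; exact PySem.Dict.contains_empty k)]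
  have hB := pvGo_items Ks 0 ks le_rfl
  simp only [zero_add] at hB
  rw [hB]
  simp [PySem.Dict.empty]
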